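-- pv_equiv track=rewrite | github.com/ASSERT-KTH/Mokav | experiments/pynguin/c4b/single-return/generated_tests/src_1418/2/src_1418.py | func
-- ===== SOURCE A (Python) =====
-- def func(*args):
--
--
-- 	def mcd(a, b):
-- 	    resto = 0
-- 	    while (b > 0):
-- 	        resto = b
-- 	        b = (a % b)
-- 	        a = resto
-- 	    return a
-- 	n = int(args[0])
-- 	y = n
-- 	k = 2
-- 	p = 0
-- 	r = 0
-- 	for q in range(0, (n - 2)):
-- 	    n = y
-- 	    while (n >= k):
-- 	        a = (n % k)
-- 	        p = (p + a)
-- 	        n = (n // k)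
-- 	    p = (p + n)
-- 	    k = (k + 1)
-- 	t = (k - 2)
-- 	a = mcd(p, t)
-- 	nu = (p // a)
-- 	de = (t // a)
-- 	return(((str(nu) + '/') + str(de)))
-- ===== SOURCE B (Python) =====
-- def func(*args):
--     n = int(args[0])
--     # digit-sum identity: sum of digits of n in base k = n - (k-1)*sum_{i>=1} n//k**i
--     total = 0
--     for k in range(2, n):
--         t = 0
--         m = n
--         while m >= k:
--             m //= k
--             t += m
--         total += n - (k - 1) * t
--     d = n - 2
--     def gcd(a, b):
--         return a if b == 0 else gcd(b, a % b)
--     g = gcd(total, d)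
--     return str(total // g) + '/' + str(d // g)
-- ===== Notes on version B (the rewrite author's own statement) =====
-- stated objective: alternative
-- what changed: B replaces A's per-base digit extraction (accumulating n%k while dividing) by the closed digit-sum identity s_k(n) = n - (k-1)*sum_{i>=1} floor(n/k^i), summing only quotients, and replaces A's iterative gcd loop by a recursive Euclid gcd.
-- outside the precondition, e.g. on func(2): A raises ZeroDivisionError, B raises ZeroDivisionError; on func(0): A raises ZeroDivisionError, B returns '0/1'; on func(1): A raises ZeroDivisionError, B returns '0/1'
import Mathlib
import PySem

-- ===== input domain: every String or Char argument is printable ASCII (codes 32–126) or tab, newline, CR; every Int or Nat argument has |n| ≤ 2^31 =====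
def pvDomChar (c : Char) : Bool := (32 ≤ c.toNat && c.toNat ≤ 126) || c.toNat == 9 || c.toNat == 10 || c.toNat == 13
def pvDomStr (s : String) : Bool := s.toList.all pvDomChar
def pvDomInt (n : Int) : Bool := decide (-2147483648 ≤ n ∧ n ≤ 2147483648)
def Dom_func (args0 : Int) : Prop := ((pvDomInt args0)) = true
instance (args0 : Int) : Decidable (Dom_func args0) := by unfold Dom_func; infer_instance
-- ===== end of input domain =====

-- B replaces A's per-base digit extraction by the digit-sum identity
-- s_k(n) = n - (k-1)*Σ_{i≥1} ⌊n/kⁱ⌋ (summing quotients only) and A's iterative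
-- gcd loop by a recursive Euclid gcd; objective: alternative (same cost class).

-- termination helper cited by the decreasing_by of both inner while loops
theorem pvFloordivToNatLt (k m : Int) (h : 2 ≤ k ∧ k ≤ m) :
    (PySem.Int.floordiv m k).toNat < m.toNat := by
  have hd : PySem.Int.floordiv m k = m / k := PySem.Int.floordiv_eq_ediv_of_pos (by omega)
  have h2 : 0 ≤ m / k := Int.ediv_nonneg (by omega) (by omega)
  have h4 : 2 * (m / k) ≤ k * (m / k) := by
    apply mul_le_mul_of_nonneg_right h.1 h2
  have h5 : k * (m / k) + m % k = m := Int.ediv_add_emod m k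
  have h6 : 0 ≤ m % k := Int.emod_nonneg m (by omega)
  have h7 : 2 * (m / k) ≤ m := by linarith
  omega

-- ===== PORT A =====
-- inner 'while n >= k: a = n % k; p = p + a; n = n // k'; returns (n, p).
-- the '2 ≤ k' conjunct is only a totality guard: in func, k is always ≥ 2.
def funcWhile (k n p : Int) : Int × Int :=
  if h : 2 ≤ k ∧ k ≤ n then
    funcWhile k (PySem.Int.floordiv n k) (p + PySem.Int.mod n k)
  else (n, p)
termination_by n.toNat
decreasing_by exact pvFloordivToNatLt k n h

-- the body of the 'for q in range(0, n - 2)' loop of A; state is (k, p); y is the saved n.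
def funcStep (y : Int) (s : Int × Int) (_q : Int) : Int × Int :=
  let r := funcWhile s.1 y s.2
  (s.1 + 1, r.2 + r.1)

-- 'def mcd(a, b): while b > 0: resto = b; b = a % b; a = resto; return a'
def funcMcd (a b : Int) : Int :=
  if h : 0 < b then funcMcd b (PySem.Int.mod a b) else a
termination_by b.toNat
decreasing_by
  have h1 : 0 ≤ PySem.Int.mod a b := PySem.Int.mod_nonneg a h
  have h2 : PySem.Int.mod a b < b := PySem.Int.mod_lt a h
  omega

def func (args0 : Int) : String :=
  let n := args0
  let y := n
  let s := (PySem.List.pyRange 0 (n - 2) 1).foldl (funcStep y) (2, 0)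
  let t := s.1 - 2
  let a := funcMcd s.2 t
  let nu := PySem.Int.floordiv s.2 a
  let de := PySem.Int.floordiv t a
  PySem.Int.toStr nu ++ "/" ++ PySem.Int.toStr de

-- ===== PORT B =====
-- inner 'while m >= k: m //= k; t += m' of B; the '2 ≤ k' conjunct is only a
-- totality guard: in func_alt, k is always ≥ 2.
def altPow (k m t : Int) : Int :=
  if h : 2 ≤ k ∧ k ≤ m then
    altPow k (PySem.Int.floordiv m k) (t + PySem.Int.floordiv m k)
  else t
termination_by m.toNat
decreasing_by exact pvFloordivToNatLt k m h

-- body of B's 'for k in range(2, n)'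
def altStep (n total k : Int) : Int :=
  total + (n - (k - 1) * altPow k n 0)

-- 'def gcd(a, b): return a if b == 0 else gcd(b, a % b)'
def altGcd (a b : Int) : Int :=
  if h : b = 0 then a else altGcd b (PySem.Int.mod a b)
termination_by b.natAbs
decreasing_by
  rcases lt_or_gt_of_ne h with hb | hb
  · have := PySem.Int.mod_neg_bounds a hb
    omega
  · have h1 : 0 ≤ PySem.Int.mod a b := PySem.Int.mod_nonneg a hb
    have h2 : PySem.Int.mod a b < b := PySem.Int.mod_lt a hb
    omega

def func_alt (args0 : Int) : String :=
  let n := args0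
  let total := (PySem.List.pyRange 2 n 1).foldl (altStep n) 0
  let d := n - 2
  let g := altGcd total d
  PySem.Int.toStr (PySem.Int.floordiv total g) ++ "/" ++ PySem.Int.toStr (PySem.Int.floordiv d g)

-- ===== PRECONDITION & SPEC =====
-- Pre_ excludes n ≤ 2, on which A raises ZeroDivisionError (the loop never runs,
-- so mcd(0, n-2) returns 0 and 'p // a' divides by zero).
def Pre_func (args0 : Int) : Prop := 3 ≤ args0
instance (args0 : Int) : Decidable (Pre_func args0) := by unfold Pre_func; infer_instance
def pvWitness_func : Int := (5)
def Spec_func (args0 : Int) (out : String) : Prop := out = func_alt args0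
instance (args0 : Int) (out : String) : Decidable (Spec_func args0 out) := by unfold Spec_func; infer_instance

-- ===== CLAIM (what is proved, stated in full; the proofs are below) =====
def Claim_equal_func : Prop := ∀ (args0 : Int), Dom_func args0 → Pre_func args0 → Spec_func args0 (func args0)

-- ===== LEMMAS AND PROOFS =====

-- accumulator shift for B's quotient-sum loop
theorem altPow_shift (k m t : Int) : altPow k m t = t + altPow k m 0 := by
  by_cases h : 2 ≤ k ∧ k ≤ m
  · rw [altPow, dif_pos h,
        altPow_shift k (PySem.Int.floordiv m k) (t + PySem.Int.floordiv m k)]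
    conv_rhs => rw [altPow, dif_pos h,
        altPow_shift k (PySem.Int.floordiv m k) (0 + PySem.Int.floordiv m k)]
    ring
  · rw [altPow, dif_neg h]
    conv_rhs => rw [altPow, dif_neg h]
    ring
termination_by m.toNat
decreasing_by all_goals exact pvFloordivToNatLt k m h

-- accumulator shift for A's digit loop
theorem funcWhile_shift (k n p : Int) :
    funcWhile k n p = ((funcWhile k n 0).1, p + (funcWhile k n 0).2) := by
  by_cases h : 2 ≤ k ∧ k ≤ n
  · rw [funcWhile, dif_pos h,
        funcWhile_shift k (PySem.Int.floordiv n k) (p + PySem.Int.mod n k)]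
    conv_rhs => rw [funcWhile, dif_pos h,
        funcWhile_shift k (PySem.Int.floordiv n k) (0 + PySem.Int.mod n k)]
    refine Prod.ext rfl ?_
    simp only []
    ring
  · rw [funcWhile, dif_neg h]
    conv_rhs => rw [funcWhile, dif_neg h]
    simp
termination_by n.toNat
decreasing_by all_goals exact pvFloordivToNatLt k n h

-- digit-sum identity: A's digit loop total equals n - (k-1) * (B's quotient sum)
theorem digit_identity (k n : Int) (hk : 2 ≤ k) (hn : 0 ≤ n) :
    (funcWhile k n 0).2 + (funcWhile k n 0).1 = n - (k - 1) * altPow k n 0 := by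
  rw [funcWhile, altPow]
  split_ifs with h
  · rw [funcWhile_shift k (PySem.Int.floordiv n k) (0 + PySem.Int.mod n k),
        altPow_shift k (PySem.Int.floordiv n k) (0 + PySem.Int.floordiv n k)]
    have hfd : 0 ≤ PySem.Int.floordiv n k := by
      rw [PySem.Int.floordiv_eq_ediv_of_pos (by omega)]
      exact Int.ediv_nonneg (by omega) (by omega)
    have ih := digit_identity k (PySem.Int.floordiv n k) hk hfd
    have key : PySem.Int.floordiv n k * k + PySem.Int.mod n k = n :=
      PySem.Int.floordiv_mul_add_mod n k
    simp only []
    nlinarith [ih, key]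
  · simp
termination_by n.toNat
decreasing_by exact pvFloordivToNatLt k n h

-- the two outer folds agree
theorem fold_eq (y : Int) (hy : 0 ≤ y) : ∀ (m : Nat) (a k0 p0 : Int), 2 ≤ k0 →
    (PySem.List.pyRange a (a + (m : Int)) 1).foldl (funcStep y) (k0, p0)
      = (k0 + m, (PySem.List.pyRange k0 (k0 + (m : Int)) 1).foldl (altStep y) p0) := by
  intro m
  induction m with
  | zero =>
      intro a k0 p0 hk0
      simp [PySem.List.pyRange_one_eq_nil]
  | succ m ih =>
      intro a k0 p0 hk0
      have ha : a < a + ((m + 1 : Nat) : Int) := by push_cast; omega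
      have hk : k0 < k0 + ((m + 1 : Nat) : Int) := by push_cast; omega
      rw [PySem.List.pyRange_one_cons ha, PySem.List.pyRange_one_cons hk,
          List.foldl_cons, List.foldl_cons]
      have hstep : funcStep y (k0, p0) a = (k0 + 1, altStep y p0 k0) := by
        unfold funcStep altStep
        simp only []
        rw [funcWhile_shift k0 y p0]
        have hd := digit_identity k0 y hk0 hy
        refine Prod.ext rfl ?_
        simp only []
        linarith [hd]
      rw [hstep]
      have e1 : a + ((m + 1 : Nat) : Int) = (a + 1) + (m : Int) := by push_cast; ring
      have e2 : k0 + ((m + 1 : Nat) : Int) = (k0 + 1) + (m : Int) := by push_cast; ring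
      rw [e1, e2]
      rw [ih (a + 1) (k0 + 1) (altStep y p0 k0) (by omega)]

theorem gcd_eq (b : Int) (hb : 0 ≤ b) (a : Int) : funcMcd a b = altGcd a b := by
  rw [funcMcd, altGcd]
  split_ifs with h1 h2
  · omega
  · have hm : 0 ≤ PySem.Int.mod a b := PySem.Int.mod_nonneg a h1
    exact gcd_eq (PySem.Int.mod a b) hm b
  · rfl
  · omega
termination_by b.toNat
decreasing_by
  have h2 : PySem.Int.mod a b < b := PySem.Int.mod_lt a h1
  omega

-- ===== VERDICT (by name: the statement is the Claim_ definition above) =====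
theorem func_spec : Claim_equal_func := by
  intro args0 _hdom hpre
  have h3 : 3 ≤ args0 := hpre
  show func args0 = func_alt args0
  unfold func func_alt
  simp only []
  set n := args0 with hn
  obtain ⟨m, hm⟩ : ∃ m : Nat, (m : Int) = n - 2 := ⟨(n - 2).toNat, by omega⟩
  have hr0 : n - 2 = 0 + (m : Int) := by omega
  have hrn : n = 2 + (m : Int) := by omega
  rw [hr0, fold_eq n (by omega) m 0 2 0 (by omega)]
  simp only []
  rw [hrn]
  have ht : 2 + (m : Int) - 2 = (m : Int) := by ring
  rw [ht]
  simp only [zero_add]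
  rw [gcd_eq (m : Int) (by omega)]
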